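-- pv_equiv track=rewrite | github.com/shihabshahrier/CSE_221_Algo_python_Assignments | LabSection02_20301113_CSE221LabAssignment06_Summer2022/task01.py | reduce0
-- ===== SOURCE A (Python) =====
-- def reduce0(n):
--     count = 0
--     while n != 0:
--         m = 0
--         for i in str(n):
--             if m < int(i):
--                 m = int(i)
--         n -= m
--         count += 1
--     return count
-- ===== SOURCE B (Python) =====
-- def reduce0(n):
--     # Process one decade (block of ten) at a time: with k, d = divmod(n, 10) and
--     # P = max digit of k, the 1-2 subtractions that leave the current decade are
--     # computed arithmetically instead of re-scanning str(n) every step.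
--     count = 0
--     while n >= 10:
--         k, d = divmod(n, 10)
--         P = 0
--         t = k
--         while t:
--             if t % 10 > P:
--                 P = t % 10
--             t //= 10
--         if d > P:
--             count += 2
--             n = 10 * k - P
--         else:
--             count += 1
--             n -= P
--     if n > 0:
--         count += 1
--     return count
-- ===== Notes on version B (the rewrite author's own statement) =====
-- stated objective: faster
-- what changed: B replaces the per-step str(n) digit scan with decade batching: a single divmod plus an arithmetic prefix-max-digit loop handles at once all subtractions that leave the current block of ten.
import Mathlib
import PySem

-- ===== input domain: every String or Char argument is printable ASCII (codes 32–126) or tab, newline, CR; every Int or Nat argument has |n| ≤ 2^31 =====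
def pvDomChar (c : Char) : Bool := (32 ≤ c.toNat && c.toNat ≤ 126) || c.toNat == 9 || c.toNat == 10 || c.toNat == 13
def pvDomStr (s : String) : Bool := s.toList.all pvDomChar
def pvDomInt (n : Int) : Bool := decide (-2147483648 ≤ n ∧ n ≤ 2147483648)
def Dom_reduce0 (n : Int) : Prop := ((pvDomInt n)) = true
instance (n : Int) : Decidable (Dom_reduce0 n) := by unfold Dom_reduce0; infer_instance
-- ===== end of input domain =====

-- B processes one decade per iteration (divmod + arithmetic prefix max) instead of re-scanning
-- str(n) for every single subtraction; equivalence of the return values is proved for nonnegative n.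

-- ===== PORT A =====
-- m = 0; for i in str(n): if m < int(i): m = int(i)
-- (int(i) is PySem.Int.ofChars? [i]; it parses for every char of str(n) when n ≥ 0 — the
--  n < 0 case, where Python raises ValueError on '-', is excluded by Pre_; .getD 0 is unreached there)
def pvA_maxdig (n : Int) : Int :=
  (PySem.Int.toChars n).foldl
    (fun m c => if m < (PySem.Int.ofChars? [c]).getD 0 then (PySem.Int.ofChars? [c]).getD 0 else m) 0

-- while n != 0: n -= m; count += 1   (fuel n.toNat bounds the iteration count: each step subtracts ≥ 1)
def pvA_loop : Nat → Int → Int → Int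
  | 0, _, count => count
  | f + 1, n, count =>
    if n = 0 then count else pvA_loop f (n - pvA_maxdig n) (count + 1)

def reduce0 (n : Int) : Int := pvA_loop n.toNat n 0

-- ===== PORT B =====
-- while t: if t % 10 > P: P = t % 10; t //= 10   (fuel t.toNat: t shrinks by //10 each step)
def pvB_pmax : Nat → Int → Int → Int
  | 0, _, P => P
  | f + 1, t, P =>
    if t = 0 then P
    else pvB_pmax f (PySem.Int.floordiv t 10)
      (if PySem.Int.mod t 10 > P then PySem.Int.mod t 10 else P)

-- while n >= 10: … ; then: if n > 0: count += 1   (fuel n.toNat: n shrinks by ≥ 1 per decade step)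
def pvB_loop : Nat → Int → Int → Int
  | 0, _, count => count
  | f + 1, n, count =>
    if n ≥ 10 then
      let k := PySem.Int.floordiv n 10
      let d := PySem.Int.mod n 10
      let P := pvB_pmax k.toNat k 0
      if d > P then pvB_loop f (10 * k - P) (count + 2)
      else pvB_loop f (n - P) (count + 1)
    else if n > 0 then count + 1 else count

def reduce0_alt (n : Int) : Int := pvB_loop n.toNat n 0

-- ===== PRECONDITION & SPEC =====
-- A raises ValueError on every negative n (int('-') on the sign character of str(n)); Pre_ excludes exactly those.
def Pre_reduce0 (n : Int) : Prop := 0 ≤ n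
instance (n : Int) : Decidable (Pre_reduce0 n) := by unfold Pre_reduce0; infer_instance
def pvWitness_reduce0 : Int := (57)

def Spec_reduce0 (n : Int) (out : Int) : Prop := out = reduce0_alt n
instance (n : Int) (out : Int) : Decidable (Spec_reduce0 n out) := by unfold Spec_reduce0; infer_instance

-- ===== CLAIM (what is proved, stated in full; the proofs are below) =====
def Claim_equal_reduce0 : Prop := ∀ (n : Int), Dom_reduce0 n → Pre_reduce0 n → Spec_reduce0 n (reduce0 n)

-- ===== LEMMAS AND PROOFS =====

-- arithmetic "largest decimal digit" (proof-side reference function)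
def pvMd (n : Nat) : Nat :=
  if n < 10 then n else max (pvMd (n / 10)) (n % 10)

theorem pvMd_lt10 (n : Nat) : pvMd n < 10 := by
  induction n using Nat.strong_induction_on with
  | _ n ih =>
    rw [pvMd]
    split
    · omega
    · exact max_lt (ih (n / 10) (by omega)) (by omega)

theorem pvMd_pos (n : Nat) (h : 1 ≤ n) : 1 ≤ pvMd n := by
  induction n using Nat.strong_induction_on with
  | _ n ih =>
    rw [pvMd]
    split
    · omega
    · rename_i h10
      have := ih (n / 10) (by omega) (by omega)
      omega

theorem pvMd_le (n : Nat) : pvMd n ≤ n := by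
  induction n using Nat.strong_induction_on with
  | _ n ih =>
    rw [pvMd]
    split
    · omega
    · have := ih (n / 10) (by omega)
      have : pvMd (n / 10) ≤ n := le_trans this (by omega)
      omega

theorem pvMd_ten_mul (k : Nat) (hk : 1 ≤ k) : pvMd (10 * k) = pvMd k := by
  rw [pvMd]
  have h1 : ¬ 10 * k < 10 := by omega
  have h2 : 10 * k / 10 = k := by omega
  have h3 : 10 * k % 10 = 0 := by omega
  simp [h1, h2, h3]

theorem pvMd_unfold (t : Nat) (h : 1 ≤ t) : pvMd t = max (pvMd (t / 10)) (t % 10) := by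
  rw [pvMd]
  by_cases h10 : t < 10
  · have h1 : t / 10 = 0 := by omega
    have h2 : t % 10 = t := by omega
    rw [if_pos h10, h1, h2]
    rw [pvMd]
    simp
  · rw [if_neg h10]

-- reference step count: subtract the largest digit until 0
def pvCnt (n : Nat) : Nat :=
  if h : n = 0 then 0 else pvCnt (n - pvMd n) + 1
  decreasing_by
    have h1 := pvMd_pos n (by omega)
    have h2 := pvMd_le n
    omega

-- str(n) decomposition: the decimal rendering of n ≥ 10 ends with its last digit
theorem pv_toDigitsCore_acc (f : Nat) : ∀ (n : Nat) (acc : List Char),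
    Nat.toDigitsCore 10 f n acc = Nat.toDigitsCore 10 f n [] ++ acc := by
  induction f with
  | zero => intro n acc; simp [Nat.toDigitsCore]
  | succ f ih =>
    intro n acc
    simp only [Nat.toDigitsCore]
    split
    · simp
    · rw [ih (n / 10) [Nat.digitChar (n % 10)], ih (n / 10) (Nat.digitChar (n % 10) :: acc)]
      simp

theorem pv_toDigitsCore_fuel (f : Nat) : ∀ (g n : Nat), n < f → n < g →
    Nat.toDigitsCore 10 f n [] = Nat.toDigitsCore 10 g n [] := by
  induction f with
  | zero => intro g n h; omega
  | succ f ih =>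
    intro g n hf hg
    cases g with
    | zero => omega
    | succ g =>
      simp only [Nat.toDigitsCore]
      split
      · rfl
      · rename_i hnz
        have hn : n / 10 < n := Nat.div_lt_self (by omega) (by omega)
        rw [pv_toDigitsCore_acc f, pv_toDigitsCore_acc g, ih g (n / 10) (by omega) (by omega)]

theorem pv_toDigits_step (n : Nat) (h : 10 ≤ n) :
    Nat.toDigits 10 n = Nat.toDigits 10 (n / 10) ++ [Nat.digitChar (n % 10)] := by
  unfold Nat.toDigits
  conv_lhs => rw [Nat.toDigitsCore]
  have hnz : n / 10 ≠ 0 := by omega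
  simp only [hnz, if_false]
  rw [pv_toDigitsCore_acc n (n / 10) [Nat.digitChar (n % 10)],
    pv_toDigitsCore_fuel n (n / 10 + 1) (n / 10) (by omega) (by omega)]

theorem pv_toDigits_single (n : Nat) (h : n < 10) : Nat.toDigits 10 n = [Nat.digitChar n] := by
  unfold Nat.toDigits
  rw [Nat.toDigitsCore]
  have h1 : n / 10 = 0 := by omega
  have h2 : n % 10 = n := by omega
  simp [h1, h2]

theorem pv_ofChars_digitChar (d : Nat) (h : d < 10) :
    PySem.Int.ofChars? [Nat.digitChar d] = some (d : Int) := by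
  interval_cases d <;> decide

-- A's inner for-loop computes the arithmetic largest digit
theorem pvA_maxdig_eq (n : Nat) : pvA_maxdig (n : Int) = (pvMd n : Int) := by
  have key : ∀ m : Nat,
      (Nat.toDigits 10 m).foldl
        (fun m c => if m < (PySem.Int.ofChars? [c]).getD 0 then (PySem.Int.ofChars? [c]).getD 0 else m) 0
        = (pvMd m : Int) := by
    intro m
    induction m using Nat.strong_induction_on with
    | _ m ih =>
      by_cases hm : m < 10
      · rw [pv_toDigits_single m hm, pvMd]
        simp only [List.foldl_cons, List.foldl_nil, pv_ofChars_digitChar m hm,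
          Option.getD_some, hm, if_true]
        split <;> omega
      · rw [pv_toDigits_step m (by omega), List.foldl_append, ih (m / 10) (by omega)]
        simp only [List.foldl_cons, List.foldl_nil,
          pv_ofChars_digitChar (m % 10) (by omega), Option.getD_some]
        conv_rhs => rw [pvMd_unfold m (by omega)]
        have := pvMd_lt10 (m / 10)
        split <;> push_cast <;> omega
  unfold pvA_maxdig PySem.Int.toChars
  have h0 : ¬ ((n : Int) < 0) := by omega
  simp only [h0, if_false, Int.toNat_natCast]
  exact key n

-- A's while-loop counts pvCnt steps
theorem pvA_loop_eq (f : Nat) : ∀ (m : Nat) (c : Int), m ≤ f →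
    pvA_loop f (m : Int) c = c + (pvCnt m : Int) := by
  induction f with
  | zero =>
    intro m c h
    have : m = 0 := by omega
    subst this
    rw [pvCnt]
    simp [pvA_loop]
  | succ f ih =>
    intro m c h
    rw [pvA_loop]
    by_cases hm : m = 0
    · subst hm; rw [pvCnt]; simp
    · have hne : ¬ ((m : Int) = 0) := by exact_mod_cast hm
      simp only [hne, if_false]
      rw [pvA_maxdig_eq]
      have hle := pvMd_le m
      have hpos := pvMd_pos m (by omega)
      have hcast : (m : Int) - (pvMd m : Int) = ((m - pvMd m : Nat) : Int) := by
        push_cast [hle]; ring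
      rw [hcast, ih (m - pvMd m) (c + 1) (by omega)]
      conv_rhs => rw [pvCnt]
      simp only [hm, dite_false]
      push_cast
      ring

-- B's inner while-loop computes the arithmetic largest digit (with accumulator P)
theorem pvB_pmax_eq (f : Nat) : ∀ (t P : Nat), t ≤ f →
    pvB_pmax f (t : Int) (P : Int) = (max P (pvMd t) : Nat) := by
  induction f with
  | zero =>
    intro t P h
    have ht : t = 0 := by omega
    subst ht
    rw [pvMd]
    simp [pvB_pmax]
  | succ f ih =>
    intro t P h
    rw [pvB_pmax]
    by_cases ht : t = 0
    · subst ht; rw [pvMd]; simp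
    · have hne : ¬ ((t : Int) = 0) := by exact_mod_cast ht
      simp only [hne, if_false]
      rw [PySem.Int.floordiv_eq_ediv_of_pos (by norm_num), PySem.Int.mod_eq_emod_of_pos (by norm_num)]
      have hdiv : (t : Int) / 10 = ((t / 10 : Nat) : Int) := by omega
      have hmod : (t : Int) % 10 = ((t % 10 : Nat) : Int) := by omega
      have harg : (if (t : Int) % 10 > (P : Int) then (t : Int) % 10 else (P : Int))
          = ((max P (t % 10) : Nat) : Int) := by
        rw [hmod]; split <;> push_cast <;> omega
      rw [hdiv, harg, ih (t / 10) (max P (t % 10)) (by omega)]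
      congr 1
      rw [pvMd_unfold t (by omega)]
      omega

-- B's while-loop counts pvCnt steps
theorem pvB_loop_eq (f : Nat) : ∀ (m : Nat) (c : Int), m ≤ f →
    pvB_loop f (m : Int) c = c + (pvCnt m : Int) := by
  induction f with
  | zero =>
    intro m c h
    have : m = 0 := by omega
    subst this
    rw [pvCnt]
    simp [pvB_loop]
  | succ f ih =>
    intro m c h
    rw [pvB_loop]
    by_cases hm : 10 ≤ m
    · have hge : ((m : Int) ≥ 10) := by exact_mod_cast hm
      simp only [hge, if_true]
      rw [PySem.Int.floordiv_eq_ediv_of_pos (by norm_num), PySem.Int.mod_eq_emod_of_pos (by norm_num)]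
      have hdiv : (m : Int) / 10 = ((m / 10 : Nat) : Int) := by omega
      have hmod : (m : Int) % 10 = ((m % 10 : Nat) : Int) := by omega
      rw [hdiv, hmod]
      have htn : ((m / 10 : Nat) : Int).toNat = m / 10 := Int.toNat_natCast _
      rw [htn, show (0 : Int) = ((0 : Nat) : Int) by norm_num,
        pvB_pmax_eq (m / 10) (m / 10) 0 (le_refl _)]
      have hP : max 0 (pvMd (m / 10)) = pvMd (m / 10) := by omega
      rw [hP]
      set k := m / 10 with hk
      set d := m % 10 with hd
      set P := pvMd k with hPdef
      have hk1 : 1 ≤ k := by omega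
      have hP1 : 1 ≤ P := pvMd_pos k hk1
      have hP9 : P < 10 := pvMd_lt10 k
      have hmd : pvMd m = max P d := by
        rw [pvMd]; simp [show ¬ m < 10 by omega, ← hk, ← hd, hPdef]
      by_cases hcase : (d : Int) > (P : Int)
      · simp only [hcase, if_true]
        have hdP : P < d := by exact_mod_cast hcase
        have hcast : 10 * ((k : Nat) : Int) - ((P : Nat) : Int) = ((10 * k - P : Nat) : Int) := by
          push_cast [show P ≤ 10 * k by omega]; ring
        rw [hcast, ih (10 * k - P) (c + 2) (by omega)]
        -- two steps of the reference count: subtract d (= max digit), then P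
        have harg : m - pvMd m = 10 * k := by rw [hmd]; omega
        have s1 : pvCnt m = pvCnt (10 * k) + 1 := by
          rw [pvCnt]
          simp only [show ¬ m = 0 by omega, dite_false, harg]
        have s2 : pvCnt (10 * k) = pvCnt (10 * k - P) + 1 := by
          rw [pvCnt]
          simp only [show ¬ 10 * k = 0 by omega, dite_false]
          rw [pvMd_ten_mul k hk1, ← hPdef]
        rw [s1, s2]
        push_cast
        ring
      · simp only [hcase, if_false]
        have hdP : d ≤ P := by omega
        have hPm : P ≤ m := by have h1 := pvMd_le m; rw [hmd] at h1; omega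
        have hcast : ((m : Nat) : Int) - ((P : Nat) : Int) = ((m - P : Nat) : Int) := by
          push_cast [hPm]; ring
        rw [hcast, ih (m - P) (c + 1) (by omega)]
        have harg : m - pvMd m = m - P := by rw [hmd]; omega
        have s1 : pvCnt m = pvCnt (m - P) + 1 := by
          rw [pvCnt]
          simp only [show ¬ m = 0 by omega, dite_false, harg]
        rw [s1]
        push_cast
        ring
    · have hlt : ¬ ((m : Int) ≥ 10) := by exact_mod_cast hm
      simp only [hlt, if_false]
      by_cases h0 : m = 0
      · subst h0; rw [pvCnt]; simp
      · have hpos : ((m : Int) > 0) := by exact_mod_cast Nat.pos_of_ne_zero h0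
        simp only [hpos, if_true]
        have hc : pvCnt m = 1 := by
          rw [pvCnt]
          simp only [h0, dite_false]
          have hmd : pvMd m = m := by rw [pvMd]; simp [show m < 10 by omega]
          rw [hmd]
          simp [pvCnt]
        rw [hc]
        push_cast
        ring

-- ===== VERDICT (by name: the statement is the Claim_ definition above) =====
theorem reduce0_spec : Claim_equal_reduce0 := by
  intro n _ hpre
  unfold Spec_reduce0 reduce0 reduce0_alt
  obtain ⟨m, rfl⟩ := Int.eq_ofNat_of_zero_le hpre
  rw [Int.toNat_natCast]
  rw [pvA_loop_eq m m 0 (le_refl m), pvB_loop_eq m m 0 (le_refl m)]
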